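-- pv_equiv track=rewrite | github.com/jkwak12/pacman | basic_pathfinding.py | maze2graph
-- ===== SOURCE A (Python) =====
-- def maze2graph(maze):
-- 	height = len(maze)
-- 	width = len(maze[0]) if height else 0
-- 	graph = {(i,j):[] for j in range(width) for i in range(height) if not maze[i][j] == '%'}
-- 	for row, col in graph.keys():
-- 		if row < height - 1 and not maze[row+1][col]=='%':
-- 			graph[(row, col)].append((row + 1, col))
-- 			graph[(row + 1, col)].append((row, col))
-- 		if col < width - 1 and not maze[row][col + 1]=='%':
-- 			graph[(row, col)].append((row, col + 1))
-- 			graph[(row, col + 1)].append((row, col))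
-- 	return graph
-- ===== SOURCE B (Python) =====
-- def maze2graph(maze):
--     height = len(maze)
--     width = len(maze[0]) if height else 0
--     nodes = [(i, j) for j in range(width) for i in range(height) if maze[i][j] != '%']
--
--     def neighbors(r, c):
--         out = []
--         for dr, dc in ((0, -1), (-1, 0), (1, 0), (0, 1)):
--             nr, nc = r + dr, c + dc
--             if 0 <= nr < height and 0 <= nc < width and maze[nr][nc] != '%':
--                 out.append((nr, nc))
--         return out
--
--     return {rc: neighbors(*rc) for rc in nodes}
-- ===== Notes on version B (the rewrite author's own statement) =====
-- stated objective: alternative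
-- what changed: A builds all neighbour lists simultaneously by inserting each down/right edge bidirectionally while scanning the keys once; B computes each node's neighbour list independently by probing the four adjacent cells (left, up, down, right) for bounds and walls.
import Mathlib
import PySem

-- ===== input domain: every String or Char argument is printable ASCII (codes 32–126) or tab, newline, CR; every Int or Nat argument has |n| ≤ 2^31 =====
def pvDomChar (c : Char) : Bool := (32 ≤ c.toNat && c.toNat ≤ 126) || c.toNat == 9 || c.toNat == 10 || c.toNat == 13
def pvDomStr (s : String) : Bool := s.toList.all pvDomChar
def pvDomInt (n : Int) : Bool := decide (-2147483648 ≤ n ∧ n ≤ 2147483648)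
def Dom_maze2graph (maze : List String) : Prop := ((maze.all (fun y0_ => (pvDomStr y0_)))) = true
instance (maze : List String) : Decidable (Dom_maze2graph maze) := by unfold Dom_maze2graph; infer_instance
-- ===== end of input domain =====

-- B replaces A's bidirectional edge insertion during one key scan by an independent
-- per-node enumeration of the four candidate neighbours (objective: alternative decomposition).

-- ===== PORT A =====
-- maze[i][j] as an Option Char (none exactly where Python raises IndexError)
def pvCell (maze : List String) (i j : Int) : Option Char :=
  (PySem.List.pyGet? maze i).bind (fun s => PySem.Str.pyGet? s j)

def pvHeight (maze : List String) : Int := (maze.length : Int)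

def pvWidth (maze : List String) : Int :=
  if (maze.length : Int) ≠ 0 then ((maze.headD "").toList.length : Int) else 0

-- the dict-comprehension key order: j outer (columns), i inner (rows)
def pvNodes (maze : List String) : List (Int × Int) :=
  (PySem.List.pyRange 0 (pvWidth maze)).flatMap (fun j =>
    (PySem.List.pyRange 0 (pvHeight maze)).filterMap (fun i =>
      if pvCell maze i j ≠ some '%' then some (i, j) else none))

-- body of A's for-loop over graph.keys()
def pvStepA (maze : List String) (d : PySem.Dict (Int × Int) (List (Int × Int)))
    (rc : Int × Int) : PySem.Dict (Int × Int) (List (Int × Int)) :=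
  let d1 :=
    if rc.1 < pvHeight maze - 1 ∧ pvCell maze (rc.1 + 1) rc.2 ≠ some '%' then
      ((d.modify (rc.1, rc.2) [] (· ++ [(rc.1 + 1, rc.2)])).modify
        (rc.1 + 1, rc.2) [] (· ++ [(rc.1, rc.2)]))
    else d
  if rc.2 < pvWidth maze - 1 ∧ pvCell maze rc.1 (rc.2 + 1) ≠ some '%' then
    ((d1.modify (rc.1, rc.2) [] (· ++ [(rc.1, rc.2 + 1)])).modify
      (rc.1, rc.2 + 1) [] (· ++ [(rc.1, rc.2)]))
  else d1

def maze2graph (maze : List String) : List (Int × Int × List (Int × Int)) :=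
  let graph0 : PySem.Dict (Int × Int) (List (Int × Int)) :=
    (pvNodes maze).foldl (fun d k => d.insert k []) PySem.Dict.empty
  let graph := graph0.keys.foldl (pvStepA maze) graph0
  graph.items.map (fun p => (p.1.1, p.1.2, p.2))

-- ===== PORT B =====
def pvDirs : List (Int × Int) := [(0, -1), (-1, 0), (1, 0), (0, 1)]

def pvNbrs (maze : List String) (r c : Int) : List (Int × Int) :=
  pvDirs.foldl (fun out dd =>
    if 0 ≤ r + dd.1 ∧ r + dd.1 < pvHeight maze ∧ 0 ≤ c + dd.2 ∧ c + dd.2 < pvWidth maze ∧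
        pvCell maze (r + dd.1) (c + dd.2) ≠ some '%' then
      out ++ [(r + dd.1, c + dd.2)]
    else out) []

def maze2graph_alt (maze : List String) : List (Int × Int × List (Int × Int)) :=
  let g : PySem.Dict (Int × Int) (List (Int × Int)) :=
    (pvNodes maze).foldl (fun d rc => d.insert rc (pvNbrs maze rc.1 rc.2)) PySem.Dict.empty
  g.items.map (fun p => (p.1.1, p.1.2, p.2))

-- ===== PRECONDITION & SPEC =====
-- Pre_ excludes exactly the ragged mazes (a row shorter than row 0) on which Python A raises IndexError.
def Pre_maze2graph (maze : List String) : Prop :=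
  ∀ s ∈ maze, (maze.headD "").toList.length ≤ s.toList.length
instance (maze : List String) : Decidable (Pre_maze2graph maze) := by
  unfold Pre_maze2graph; infer_instance

def pvWitness_maze2graph : List String := ["%..", ".%.", "..."]

def Spec_maze2graph (maze : List String) (out : List (Int × Int × List (Int × Int))) : Prop := out = maze2graph_alt maze
instance (maze : List String) (out : List (Int × Int × List (Int × Int))) : Decidable (Spec_maze2graph maze out) := by unfold Spec_maze2graph; infer_instance

-- ===== CLAIM (what is proved, stated in full; the proofs are below) =====
def Claim_equal_maze2graph : Prop := ∀ (maze : List String), Dom_maze2graph maze → Pre_maze2graph maze → Spec_maze2graph maze (maze2graph maze)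

-- ===== LEMMAS AND PROOFS =====

-- column-major order on the node list
def pvCmLt (a b : Int × Int) : Prop := a.2 < b.2 ∨ (a.2 = b.2 ∧ a.1 < b.1)

-- the neighbour list of k after A's loop has processed the prefix `done` of the keys
def pvP (maze : List String) (k : Int × Int) (done : List (Int × Int)) : List (Int × Int) :=
  (if (k.1, k.2 - 1) ∈ done then [(k.1, k.2 - 1)] else []) ++
  (if (k.1 - 1, k.2) ∈ done then [(k.1 - 1, k.2)] else []) ++
  (if k ∈ done then
    (if k.1 < pvHeight maze - 1 ∧ pvCell maze (k.1 + 1) k.2 ≠ some '%' then [(k.1 + 1, k.2)] else []) ++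
    (if k.2 < pvWidth maze - 1 ∧ pvCell maze k.1 (k.2 + 1) ≠ some '%' then [(k.1, k.2 + 1)] else [])
  else [])

lemma pv_mem_nodes (maze : List String) (k : Int × Int) :
    k ∈ pvNodes maze ↔
      0 ≤ k.1 ∧ k.1 < pvHeight maze ∧ 0 ≤ k.2 ∧ k.2 < pvWidth maze ∧
        pvCell maze k.1 k.2 ≠ some '%' := by
  rcases k with ⟨i, j⟩
  simp only [pvNodes, List.mem_flatMap, List.mem_filterMap, PySem.List.mem_pyRange_one,
    Option.ite_none_right_eq_some, Option.some.injEq, Prod.mk.injEq]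
  constructor
  · rintro ⟨j', hj', i', hi', hc, rfl, rfl⟩
    exact ⟨hi'.1, hi'.2, hj'.1, hj'.2, hc⟩
  · rintro ⟨h1, h2, h3, h4, h5⟩
    exact ⟨j, ⟨h3, h4⟩, i, ⟨h1, h2⟩, h5, rfl, rfl⟩

lemma pv_pyRange_pairwise (n : Nat) :
    (PySem.List.pyRange 0 (n : Int)).Pairwise (· < ·) := by
  rw [PySem.List.pyRange_zero_natCast]
  exact (List.pairwise_lt_range).map _ (by intro a b h; exact_mod_cast h)

lemma pv_nodes_pairwise (maze : List String) : (pvNodes maze).Pairwise pvCmLt := by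
  have hW : ∃ n : Nat, pvWidth maze = (n : Int) := by
    unfold pvWidth; split
    · exact ⟨(maze.headD "").toList.length, rfl⟩
    · exact ⟨0, rfl⟩
  obtain ⟨w, hw⟩ := hW
  unfold pvNodes
  rw [hw]
  rw [List.pairwise_flatMap]
  constructor
  · intro j _
    rw [List.pairwise_filterMap]
    refine List.Pairwise.imp ?_ (pv_pyRange_pairwise maze.length)
    intro a b hab x hx y hy
    split at hx <;> split at hy <;> simp_all
    cases hx; cases hy; exact Or.inr ⟨rfl, hab⟩
  · refine List.Pairwise.imp ?_ (pv_pyRange_pairwise w)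
    intro a b hab x hx y hy
    simp only [List.mem_filterMap] at hx hy
    obtain ⟨i1, _, hx⟩ := hx; obtain ⟨i2, _, hy⟩ := hy
    split at hx <;> split at hy <;> simp_all
    cases hx; cases hy; exact Or.inl hab

lemma pv_nodes_nodup (maze : List String) : (pvNodes maze).Nodup := by
  refine (pv_nodes_pairwise maze).imp ?_
  intro a b h
  rcases h with h | ⟨h1, h2⟩ <;> intro hab <;> subst hab <;> omega

lemma pv_modify_map {ν : Type} (ns : List (Int × Int)) (f : Int × Int → ν)
    (hnd : ns.Nodup) (x : Int × Int) (hx : x ∈ ns) (d0 : ν) (g : ν → ν) :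
    (PySem.Dict.mk (ns.map (fun k => (k, f k)))).modify x d0 g
      = PySem.Dict.mk (ns.map (fun k => (k, if k = x then g (f k) else f k))) := by
  have hkeys : (PySem.Dict.mk (ns.map (fun k => (k, f k)))).keys = ns := by
    simp [PySem.Dict.keys, Function.comp_def]
  have hcon : (PySem.Dict.mk (ns.map (fun k => (k, f k)))).contains x = true := by
    rw [PySem.Dict.contains_eq_decide_mem_keys, hkeys]; simpa using hx
  have hget : (PySem.Dict.mk (ns.map (fun k => (k, f k)))).getD x d0 = f x := by
    apply PySem.Dict.getD_of_mem_items
    · exact List.mem_map_of_mem hx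
    · rw [hkeys]; exact hnd
  unfold PySem.Dict.modify PySem.Dict.insert
  rw [if_pos hcon, hget]
  congr 1
  rw [List.map_map]
  refine List.map_congr_left ?_
  intro k hk
  by_cases h : k = x
  · subst h; simp
  · simp [h]

lemma pv_step (maze : List String) (done rest : List (Int × Int)) (k : Int × Int)
    (h : pvNodes maze = done ++ k :: rest) :
    pvStepA maze (PySem.Dict.mk ((pvNodes maze).map (fun k' => (k', pvP maze k' done)))) k
      = PySem.Dict.mk ((pvNodes maze).map (fun k' => (k', pvP maze k' (done ++ [k])))) := by
  obtain ⟨r, c⟩ := k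
  have hnd := pv_nodes_nodup maze
  have hk : ((r, c) : Int × Int) ∈ pvNodes maze := by rw [h]; simp
  obtain ⟨hk1, hk2, hk3, hk4, hk5⟩ := (pv_mem_nodes maze (r, c)).1 hk
  have hdone : ∀ x ∈ done, pvCmLt x (r, c) := by
    have hpw := pv_nodes_pairwise maze
    rw [h, List.pairwise_append] at hpw
    intro x hx
    exact hpw.2.2 x hx (r, c) (by simp)
  have hnotin : ∀ x : Int × Int, ¬ pvCmLt x (r, c) → x ∉ done :=
    fun x hx hmem => hx (hdone x hmem)
  have hkdone : ((r, c) : Int × Int) ∉ done := hnotin _ (by simp [pvCmLt])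
  have hDdone : ((r + 1, c) : Int × Int) ∉ done := hnotin _ (by simp [pvCmLt])
  have hRdone : ((r, c + 1) : Int × Int) ∉ done := hnotin _ (by simp [pvCmLt])
  have hURdone : ((r - 1, c + 1) : Int × Int) ∉ done := hnotin _ (by simp [pvCmLt])
  have hDmem : ((r + 1, c) : Int × Int) ∈ pvNodes maze ↔
      (r < pvHeight maze - 1 ∧ pvCell maze (r + 1) c ≠ some '%') := by
    rw [pv_mem_nodes]
    constructor
    · rintro ⟨_, h2', _, _, h5'⟩; exact ⟨by omega, h5'⟩
    · rintro ⟨h2', h5'⟩; exact ⟨by omega, by omega, hk3, hk4, h5'⟩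
  have hRmem : ((r, c + 1) : Int × Int) ∈ pvNodes maze ↔
      (c < pvWidth maze - 1 ∧ pvCell maze r (c + 1) ≠ some '%') := by
    rw [pv_mem_nodes]
    constructor
    · rintro ⟨_, _, _, h4', h5'⟩; exact ⟨by omega, h5'⟩
    · rintro ⟨h4', h5'⟩; exact ⟨hk1, hk2, by omega, by omega, h5'⟩
  simp only [pvStepA]
  by_cases hR : c < pvWidth maze - 1 ∧ pvCell maze r (c + 1) ≠ some '%'
  · rw [if_pos hR]
    by_cases hD : r < pvHeight maze - 1 ∧ pvCell maze (r + 1) c ≠ some '%'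
    · rw [if_pos hD]
      rw [pv_modify_map _ _ hnd (r, c) hk,
          pv_modify_map _ _ hnd (r + 1, c) (hDmem.mpr hD),
          pv_modify_map _ _ hnd (r, c) hk,
          pv_modify_map _ _ hnd (r, c + 1) (hRmem.mpr hR)]
      refine congrArg PySem.Dict.mk (List.map_congr_left ?_)
      rintro ⟨a, b⟩ hab
      simp only [Prod.mk.injEq]
      by_cases eK : a = r ∧ b = c
      · simp [pvP, List.mem_append, eK.1, eK.2, hkdone, hD, hR]
      · by_cases eD : a = r + 1 ∧ b = c
        · simp [pvP, List.mem_append, eD.1, eD.2, hkdone, hDdone]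
        · by_cases eR : a = r ∧ b = c + 1
          · simp [pvP, List.mem_append, eR.1, eR.2, hkdone, hRdone, hURdone]
          · simp [pvP, List.mem_append, eK, eD, eR,
              show ¬(a = r ∧ b - 1 = c) from by rintro ⟨rfl, hh⟩; exact eR ⟨rfl, by omega⟩,
              show ¬(a - 1 = r ∧ b = c) from by rintro ⟨hh, rfl⟩; exact eD ⟨by omega, rfl⟩]
    · rw [if_neg hD]
      rw [pv_modify_map _ _ hnd (r, c) hk,
          pv_modify_map _ _ hnd (r, c + 1) (hRmem.mpr hR)]
      refine congrArg PySem.Dict.mk (List.map_congr_left ?_)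
      rintro ⟨a, b⟩ hab
      simp only [Prod.mk.injEq]
      by_cases eK : a = r ∧ b = c
      · simp [pvP, List.mem_append, eK.1, eK.2, hkdone, hD, hR]
      · by_cases eD : a = r + 1 ∧ b = c
        · rw [eD.1, eD.2] at hab
          exact absurd (hDmem.mp hab) hD
        · by_cases eR : a = r ∧ b = c + 1
          · simp [pvP, List.mem_append, eR.1, eR.2, hkdone, hRdone, hURdone]
          · simp [pvP, List.mem_append, eK, eR,
              show ¬(a = r ∧ b - 1 = c) from by rintro ⟨rfl, hh⟩; exact eR ⟨rfl, by omega⟩,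
              show ¬(a - 1 = r ∧ b = c) from by rintro ⟨hh, rfl⟩; exact eD ⟨by omega, rfl⟩]
  · rw [if_neg hR]
    by_cases hD : r < pvHeight maze - 1 ∧ pvCell maze (r + 1) c ≠ some '%'
    · rw [if_pos hD]
      rw [pv_modify_map _ _ hnd (r, c) hk,
          pv_modify_map _ _ hnd (r + 1, c) (hDmem.mpr hD)]
      refine congrArg PySem.Dict.mk (List.map_congr_left ?_)
      rintro ⟨a, b⟩ hab
      simp only [Prod.mk.injEq]
      by_cases eK : a = r ∧ b = c
      · simp [pvP, List.mem_append, eK.1, eK.2, hkdone, hD, hR]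
      · by_cases eD : a = r + 1 ∧ b = c
        · simp [pvP, List.mem_append, eD.1, eD.2, hkdone, hDdone]
        · by_cases eR : a = r ∧ b = c + 1
          · rw [eR.1, eR.2] at hab
            exact absurd (hRmem.mp hab) hR
          · simp [pvP, List.mem_append, eK, eD,
              show ¬(a = r ∧ b - 1 = c) from by rintro ⟨rfl, hh⟩; exact eR ⟨rfl, by omega⟩,
              show ¬(a - 1 = r ∧ b = c) from by rintro ⟨hh, rfl⟩; exact eD ⟨by omega, rfl⟩]
    · rw [if_neg hD]
      refine congrArg PySem.Dict.mk (List.map_congr_left ?_)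
      rintro ⟨a, b⟩ hab
      by_cases eK : a = r ∧ b = c
      · simp [pvP, List.mem_append, eK.1, eK.2, hkdone, hD, hR]
      · by_cases eD : a = r + 1 ∧ b = c
        · rw [eD.1, eD.2] at hab
          exact absurd (hDmem.mp hab) hD
        · by_cases eR : a = r ∧ b = c + 1
          · rw [eR.1, eR.2] at hab
            exact absurd (hRmem.mp hab) hR
          · simp [pvP, List.mem_append, eK,
              show ¬(a = r ∧ b - 1 = c) from by rintro ⟨rfl, hh⟩; exact eR ⟨rfl, by omega⟩,
              show ¬(a - 1 = r ∧ b = c) from by rintro ⟨hh, rfl⟩; exact eD ⟨by omega, rfl⟩]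

lemma pv_loop (maze : List String) (todo done : List (Int × Int))
    (h : pvNodes maze = done ++ todo) :
    todo.foldl (pvStepA maze)
        (PySem.Dict.mk ((pvNodes maze).map (fun k => (k, pvP maze k done))))
      = PySem.Dict.mk ((pvNodes maze).map (fun k => (k, pvP maze k (pvNodes maze)))) := by
  induction todo generalizing done with
  | nil => rw [List.append_nil] at h; rw [← h]; rfl
  | cons k rest ih =>
      rw [List.foldl_cons, pv_step maze done rest k h]
      exact ih (done ++ [k]) (by simpa using h)

lemma pv_final (maze : List String) (k : Int × Int) (hk : k ∈ pvNodes maze) :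
    pvP maze k (pvNodes maze) = pvNbrs maze k.1 k.2 := by
  obtain ⟨h1, h2, h3, h4, h5⟩ := (pv_mem_nodes maze k).1 hk
  have eL : (if (k.1, k.2 - 1) ∈ pvNodes maze then [(k.1, k.2 - 1)] else [])
      = (if 0 ≤ k.1 ∧ k.1 < pvHeight maze ∧ 0 ≤ k.2 - 1 ∧ k.2 - 1 < pvWidth maze ∧
            pvCell maze k.1 (k.2 - 1) ≠ some '%' then [(k.1, k.2 - 1)] else []) := by
    apply if_congr (pv_mem_nodes maze _) rfl rfl
  have eU : (if (k.1 - 1, k.2) ∈ pvNodes maze then [(k.1 - 1, k.2)] else [])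
      = (if 0 ≤ k.1 - 1 ∧ k.1 - 1 < pvHeight maze ∧ 0 ≤ k.2 ∧ k.2 < pvWidth maze ∧
            pvCell maze (k.1 - 1) k.2 ≠ some '%' then [(k.1 - 1, k.2)] else []) := by
    apply if_congr (pv_mem_nodes maze _) rfl rfl
  have eD : (if k.1 < pvHeight maze - 1 ∧ pvCell maze (k.1 + 1) k.2 ≠ some '%'
        then [(k.1 + 1, k.2)] else [])
      = (if 0 ≤ k.1 + 1 ∧ k.1 + 1 < pvHeight maze ∧ 0 ≤ k.2 ∧ k.2 < pvWidth maze ∧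
            pvCell maze (k.1 + 1) k.2 ≠ some '%' then [(k.1 + 1, k.2)] else []) := by
    refine if_congr ?_ rfl rfl
    constructor
    · rintro ⟨hd, hc⟩; exact ⟨by omega, by omega, h3, h4, hc⟩
    · rintro ⟨_, hd, _, _, hc⟩; exact ⟨by omega, hc⟩
  have eR : (if k.2 < pvWidth maze - 1 ∧ pvCell maze k.1 (k.2 + 1) ≠ some '%'
        then [(k.1, k.2 + 1)] else [])
      = (if 0 ≤ k.1 ∧ k.1 < pvHeight maze ∧ 0 ≤ k.2 + 1 ∧ k.2 + 1 < pvWidth maze ∧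
            pvCell maze k.1 (k.2 + 1) ≠ some '%' then [(k.1, k.2 + 1)] else []) := by
    refine if_congr ?_ rfl rfl
    constructor
    · rintro ⟨hd, hc⟩; exact ⟨h1, h2, by omega, by omega, hc⟩
    · rintro ⟨_, _, _, hd, hc⟩; exact ⟨by omega, hc⟩
  rw [pvP, if_pos hk, eL, eU, eD, eR]
  simp only [pvNbrs, pvDirs, List.foldl_cons, List.foldl_nil]
  norm_num
  simp only [show k.1 + -1 = k.1 - 1 from by ring, show k.2 + -1 = k.2 - 1 from by ring]
  split_ifs <;> simp

-- ===== VERDICT (by name: the statement is the Claim_ definition above) =====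
theorem maze2graph_spec : Claim_equal_maze2graph := by
  intro maze _ _
  simp only [Spec_maze2graph, maze2graph, maze2graph_alt]
  have hfreshA : ∀ a ∈ pvNodes maze,
      (PySem.Dict.empty : PySem.Dict (Int × Int) (List (Int × Int))).contains a = false := by
    intro a _; simp [pysem]
  have hndm : ((pvNodes maze).map id).Nodup := by
    simpa using pv_nodes_nodup maze
  have h0 : ((pvNodes maze).foldl (fun d k => d.insert k []) PySem.Dict.empty
      : PySem.Dict (Int × Int) (List (Int × Int)))
      = PySem.Dict.mk ((pvNodes maze).map (fun k => (k, pvP maze k []))) := by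
    apply PySem.Dict.ext
    have := PySem.Dict.items_foldl_insert_fresh (pvNodes maze) id (fun _ => ([] : List (Int × Int)))
      PySem.Dict.empty hfreshA hndm
    simpa [pvP] using this
  have hB : ((pvNodes maze).foldl (fun d rc => d.insert rc (pvNbrs maze rc.1 rc.2)) PySem.Dict.empty
      : PySem.Dict (Int × Int) (List (Int × Int)))
      = PySem.Dict.mk ((pvNodes maze).map (fun rc => (rc, pvNbrs maze rc.1 rc.2))) := by
    apply PySem.Dict.ext
    have := PySem.Dict.items_foldl_insert_fresh (pvNodes maze) id
      (fun rc => pvNbrs maze rc.1 rc.2) PySem.Dict.empty hfreshA hndm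
    simpa using this
  rw [h0, hB]
  have hkeys : (PySem.Dict.mk ((pvNodes maze).map (fun k => (k, pvP maze k [])))).keys
      = pvNodes maze := by
    simp [PySem.Dict.keys, Function.comp_def]
  rw [hkeys, pv_loop maze (pvNodes maze) [] (by simp)]
  simp only [List.map_map]
  refine List.map_congr_left ?_
  intro k hk
  simp [pv_final maze k hk]
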